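-- pv_equiv track=rewrite | github.com/wcsanders1/HackerRank | EvenTree/Python/EventTree.py | even_forest
-- ===== SOURCE A (Python) =====
-- class Node:
--     value = 0
--     total_children = 0
--     children = []
--
--     def __init__(self, value):
--         self.value = value
--         self.children = []
--         self.total_children = 0
--
-- def get_or_create_node(value, nodes_map):
--     if value not in nodes_map:
--         new_node = Node(value)
--         nodes_map[value] = new_node
--     return nodes_map[value]
--
-- def get_even_subtrees(node):
--     if node is None:
--         return 0
--
--     if not node.children:
--         node.total_children = 0
--         return 0
--
--     even_subtrees = 0
--     total_children = 0
--
--     for subnode in node.children: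
--         even_subtrees += get_even_subtrees(subnode)
--
--     for subnode in node.children:
--         children = subnode.total_children + 1
--         if children > 1 and children % 2 == 0:
--             subnode.total_children = 0
--             even_subtrees += 1
--         else:
--             total_children += children
--
--     node.total_children += total_children
--
--     return even_subtrees
--
-- def even_forest(t_nodes, t_edges, t_from, t_to):
--     root = Node(1)
--     nodes_map = {1: root}
--
--     for i in range(len(t_from)):
--         child = get_or_create_node(t_from[i], nodes_map)
--         parent = get_or_create_node(t_to[i], nodes_map)
--
--         parent.children.append(child)
--
--     return get_even_subtrees(root)
-- ===== SOURCE B (Python) =====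
-- def even_forest(t_nodes, t_edges, t_from, t_to):
--     # Iterative: adjacency map, BFS from root 1 recording (node, parent) in
--     # discovery order, then a reverse pass accumulating true subtree sizes,
--     # finally count reached non-root nodes with even subtree size.
--     adj = {}
--     for c, p in zip(t_from, t_to):
--         adj.setdefault(p, []).append(c)
--     order = [(1, None)]
--     seen = {1}
--     i = 0
--     while i < len(order):
--         v = order[i][0]
--         for c in adj.get(v, []):
--             if c not in seen:
--                 seen.add(c)
--                 order.append((c, v))
--         i += 1
--     size = {v: 1 for v, _ in order}
--     for v, p in reversed(order):
--         if p is not None: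
--             size[p] += size[v]
--     return sum(1 for v, p in order if p is not None and size[v] % 2 == 0)
-- ===== Notes on version B (the rewrite author's own statement) =====
-- stated objective: alternative
-- what changed: Replaces A's recursive detach/parity walk over a mutable Node graph (counting subtrees whose reduced child-counter turns even and zeroing it) by an iterative BFS from root 1 that records (node, parent) in discovery order, a reverse-order pass accumulating true subtree sizes into the parent, and a final count of reached non-root nodes with even subtree size.
-- outside the precondition, e.g. on even_forest(0, 0, [2, 3, 3], [1, 1, 2]): A returns 1, B returns 0; on even_forest(0, 0, [2, 2], [1, 1]): A returns 0, B returns 0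
import Mathlib
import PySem

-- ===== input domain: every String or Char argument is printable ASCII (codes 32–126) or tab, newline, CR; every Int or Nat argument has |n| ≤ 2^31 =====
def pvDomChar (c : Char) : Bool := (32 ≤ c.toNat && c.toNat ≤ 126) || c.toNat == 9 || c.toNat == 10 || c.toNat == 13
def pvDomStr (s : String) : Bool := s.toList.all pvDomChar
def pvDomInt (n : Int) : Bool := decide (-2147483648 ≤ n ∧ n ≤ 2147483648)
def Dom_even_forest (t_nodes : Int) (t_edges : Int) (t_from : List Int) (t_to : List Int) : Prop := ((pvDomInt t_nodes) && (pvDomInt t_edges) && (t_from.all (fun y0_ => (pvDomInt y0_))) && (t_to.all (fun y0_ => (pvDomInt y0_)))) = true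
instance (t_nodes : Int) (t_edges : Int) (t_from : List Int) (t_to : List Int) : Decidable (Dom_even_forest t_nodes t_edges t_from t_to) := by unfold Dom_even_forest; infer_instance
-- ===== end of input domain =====

-- B replaces A's recursive detach/parity trick on a mutable node graph by an iterative
-- BFS from root 1 plus a reverse-order subtree-size accumulation (objective: alternative).

-- ===== PORT A =====
-- A's nodes_map: each node's identity is its integer value; only the children lists matter
-- for the traversal, so the map carries value ↦ children values (appended in edge order).
-- get_or_create_node's insertion of an empty node is kept (it never changes a getD [] lookup).
def pvGetOrCreate (m : PySem.Dict Int (List Int)) (v : Int) : PySem.Dict Int (List Int) :=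
  if m.contains v then m else m.insert v []

def pvNodesMap (pairs : List (Int × Int)) : PySem.Dict Int (List Int) :=
  pairs.foldl (fun m cp =>
    let m1 := pvGetOrCreate m cp.1
    let m2 := pvGetOrCreate m1 cp.2
    m2.insert cp.2 (m2.getD cp.2 [] ++ [cp.1]))
    ((PySem.Dict.empty).insert 1 [])

-- get_even_subtrees: the mutable per-node total_children counters are threaded as a
-- Dict Int Int (getD default 0 = the fresh node's 0). The `node is None` branch of the
-- Python is unreachable (children always hold nodes) and has no counterpart.
-- Fuel (recursion depth) t_from.length+1 is a totality guard only: inside Pre_ the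
-- reachable subgraph is a tree whose depth is below the number of edges.
def pvGoA (cmap : PySem.Dict Int (List Int)) : Nat → Int → PySem.Dict Int Int → Int × PySem.Dict Int Int
  | 0, _, tc => (0, tc)
  | fuel+1, v, tc =>
    let ch := cmap.getD v []
    if ch = [] then (0, tc.insert v 0)
    else
      let s1 := ch.foldl (fun (p : Int × PySem.Dict Int Int) c =>
        let r := pvGoA cmap fuel c p.2
        (p.1 + r.1, r.2)) (0, tc)
      let s2 := ch.foldl (fun (p : Int × Int × PySem.Dict Int Int) c =>
        let k := p.2.2.getD c 0 + 1
        if 1 < k ∧ PySem.Int.mod k 2 = 0 then (p.1 + 1, p.2.1, p.2.2.insert c 0)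
        else (p.1, p.2.1 + k, p.2.2)) (s1.1, (0 : Int), s1.2)
      (s2.1, s2.2.2.insert v (s2.2.2.getD v 0 + s2.2.1))

-- zip truncates where the Python indexes t_to[i]; Pre_ demands len t_from ≤ len t_to, where both agree.
def even_forest (t_nodes : Int) (t_edges : Int) (t_from : List Int) (t_to : List Int) : Int :=
  (pvGoA (pvNodesMap (t_from.zip t_to)) (t_from.length + 1) 1 PySem.Dict.empty).1

-- ===== PORT B =====
def pvAdj (pairs : List (Int × Int)) : PySem.Dict Int (List Int) :=
  pairs.foldl (fun m cp => m.modify cp.2 [] (fun l => l ++ [cp.1])) PySem.Dict.empty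

-- Source B's `while i < len(order)` BFS loop; fuel t_from.length+1 is a totality guard that
-- always dominates the loop's iteration count (each iteration past the first consumes a
-- fresh element of t_from enqueued at most once thanks to the `seen` check).
def pvBfs (adj : PySem.Dict Int (List Int)) : Nat → List (Int × Option Int) → PySem.Set Int → Nat → List (Int × Option Int)
  | 0, order, _, _ => order
  | fuel+1, order, seen, i =>
    match order[i]? with
    | none => order
    | some vp =>
      let st := (adj.getD vp.1 []).foldl
        (fun (p : List (Int × Option Int) × PySem.Set Int) c =>
          if PySem.Set.contains p.2 c then p else (p.1 ++ [(c, some vp.1)], PySem.Set.add p.2 c))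
        (order, seen)
      pvBfs adj fuel st.1 st.2 (i+1)

def even_forest_alt (t_nodes : Int) (t_edges : Int) (t_from : List Int) (t_to : List Int) : Int :=
  let adj := pvAdj (t_from.zip t_to)
  let order := pvBfs adj (t_from.length + 1) [((1 : Int), (none : Option Int))] (PySem.Set.ofList [(1 : Int)]) 0
  let size0 := order.foldl (fun (m : PySem.Dict Int Int) vp => m.insert vp.1 1) PySem.Dict.empty
  let size := order.reverse.foldl (fun (m : PySem.Dict Int Int) vp =>
      match vp.2 with
      | some p => m.insert p (m.getD p 0 + m.getD vp.1 0)
      | none => m) size0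
  ((order.filter (fun vp => vp.2.isSome && (PySem.Int.mod (size.getD vp.1 0) 2 == 0))).length : Int)

-- ===== PRECONDITION & SPEC =====
-- Closure of the set {1} under the parent→child edges (t_to[i] → t_from[i]); pairs.length+1
-- saturating passes always reach the fixpoint (at most pairs.length values can ever be added).
def pvStep (pairs : List (Int × Int)) (R : List Int) : List Int :=
  pairs.foldl (fun R cp => if cp.2 ∈ R ∧ cp.1 ∉ R then R ++ [cp.1] else R) R

def pvReach (pairs : List (Int × Int)) : List Int :=
  (pvStep pairs)^[pairs.length + 1] [1]

-- the child ends of all edges whose parent end is reachable from the root 1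
def pvOccs (pairs : List (Int × Int)) : List Int :=
  (pairs.filter (fun cp => decide (cp.2 ∈ pvReach pairs))).map Prod.fst

-- Pre_ is the problem's natural domain (HackerRank's Even Tree guarantees a tree): the part
-- of the graph reachable from root 1 must be a tree — no reachable node is a child twice and
-- the root is nobody's child — and every index t_to[i] the Python reads must exist.  Outside
-- it A raises (IndexError on a short t_to, RecursionError on a reachable cycle) or walks
-- shared mutable nodes twice; B is not contorted to copy that.  The second conjunct (the
-- reachable set is closed under edges) holds for every input; it is stated for direct use.
def Pre_even_forest (t_nodes : Int) (t_edges : Int) (t_from : List Int) (t_to : List Int) : Prop :=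
  t_from.length ≤ t_to.length ∧
  (∀ cp ∈ t_from.zip t_to, cp.2 ∈ pvReach (t_from.zip t_to) → cp.1 ∈ pvReach (t_from.zip t_to)) ∧
  (pvOccs (t_from.zip t_to)).Nodup ∧
  (1 : Int) ∉ pvOccs (t_from.zip t_to)

instance (t_nodes : Int) (t_edges : Int) (t_from : List Int) (t_to : List Int) : Decidable (Pre_even_forest t_nodes t_edges t_from t_to) := by
  unfold Pre_even_forest; infer_instance

def pvWitness_even_forest : Int × Int × List Int × List Int := (3, 2, [2, 3], [1, 2])

def Spec_even_forest (t_nodes : Int) (t_edges : Int) (t_from : List Int) (t_to : List Int) (out : Int) : Prop := out = even_forest_alt t_nodes t_edges t_from t_to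
instance (t_nodes : Int) (t_edges : Int) (t_from : List Int) (t_to : List Int) (out : Int) : Decidable (Spec_even_forest t_nodes t_edges t_from t_to out) := by unfold Spec_even_forest; infer_instance

-- ===== CLAIM (what is proved, stated in full; the proofs are below) =====
def Claim_equal_even_forest : Prop := ∀ (t_nodes : Int) (t_edges : Int) (t_from : List Int) (t_to : List Int), Dom_even_forest t_nodes t_edges t_from t_to → Pre_even_forest t_nodes t_edges t_from t_to → Spec_even_forest t_nodes t_edges t_from t_to (even_forest t_nodes t_edges t_from t_to)

-- ===== LEMMAS AND PROOFS =====

-- the tree-shape hypotheses of Pre_ on the zipped edge list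
def pvHyp (pairs : List (Int × Int)) : Prop :=
  (∀ cp ∈ pairs, cp.2 ∈ pvReach pairs → cp.1 ∈ pvReach pairs) ∧
  (pvOccs pairs).Nodup ∧ (1 : Int) ∉ pvOccs pairs

-- children of v (= the adjacency both ports read)
def pvKids (pairs : List (Int × Int)) (v : Int) : List Int :=
  (pairs.filter (fun cp => cp.2 == v)).map Prod.fst

-- cs is a downward path starting (strictly below) v
def pvChain (pairs : List (Int × Int)) : Int → List Int → Prop
  | _, [] => True
  | v, c :: cs => c ∈ pvKids pairs v ∧ pvChain pairs c cs

-- every chain from v is shorter than f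
def pvCB (pairs : List (Int × Int)) (v : Int) (f : Nat) : Prop :=
  ∀ cs, pvChain pairs v cs → cs.length < f

-- fuel-truncated preorder listing of the subtree at v
def pvDesc (pairs : List (Int × Int)) : Nat → Int → List Int
  | 0, v => [v]
  | f+1, v => v :: (pvKids pairs v).flatMap (pvDesc pairs f)

def pvSzN (pairs : List (Int × Int)) (f : Nat) (v : Int) : Int := ((pvDesc pairs f v).length : Int)

def pvF (pairs : List (Int × Int)) : Nat := pairs.length + 1

-- the (stable) subtree size of v
def pvSZ (pairs : List (Int × Int)) (v : Int) : Int := pvSzN pairs (pvF pairs) v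

-- the value A's total_children counter holds for v after its visit
def pvRed (pairs : List (Int × Int)) : Nat → Int → Int
  | 0, _ => 0
  | f+1, v => ((pvKids pairs v).map (fun c =>
      let k := pvRed pairs f c + 1
      if 1 < k ∧ PySem.Int.mod k 2 = 0 then 0 else k)).sum

-- the value A's recursion returns for v (count of detached even subtrees strictly below v)
def pvEvc (pairs : List (Int × Int)) : Nat → Int → Int
  | 0, _ => 0
  | f+1, v => ((pvKids pairs v).map (fun c =>
      pvEvc pairs f c + if pvSzN pairs f c % 2 = 0 then (1 : Int) else 0)).sum

-- ---------- generic list helpers ----------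
theorem pv_nodup_length_le {l l' : List Int} (h : l.Nodup) (hs : l ⊆ l') :
    l.length ≤ l'.length := by
  classical
  calc l.length = l.toFinset.card := (List.toFinset_card_of_nodup h).symm
    _ ≤ l'.toFinset.card := Finset.card_le_card (fun x hx => by
        simp only [List.mem_toFinset] at *; exact hs hx)
    _ ≤ l'.length := l'.toFinset_card_le

theorem pv_flatMap_congr {α β : Type} {l : List α} {f g : α → List β}
    (h : ∀ c ∈ l, f c = g c) : l.flatMap f = l.flatMap g := by
  induction l with
  | nil => rfl
  | cons x xs ih =>
    simp only [List.flatMap_cons]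
    rw [h x (by simp), ih (fun c hc => h c (by simp [hc]))]

theorem pv_countP_flatMap {α : Type} (l : List α) (f : α → List Int) (p : Int → Bool) :
    (l.flatMap f).countP p = (l.map (fun a => (f a).countP p)).sum := by
  induction l with
  | nil => simp
  | cons x xs ih => simp [List.flatMap_cons, List.countP_append, ih]

theorem pv_sum_parity (l : List Int) (g h : Int → Int) (hg : ∀ x ∈ l, g x % 2 = h x % 2) :
    (l.map g).sum % 2 = (l.map h).sum % 2 := by
  induction l with
  | nil => rfl
  | cons x xs ih =>
    simp only [List.map_cons, List.sum_cons]
    have h1 := hg x (by simp)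
    have h2 := ih (fun y hy => hg y (by simp [hy]))
    omega

theorem pv_getLastD_append (la l₂ : List Int) (d : Int) :
    (la ++ l₂).getLastD d = l₂.getLastD (la.getLastD d) := by
  induction la generalizing d with
  | nil => rfl
  | cons x xs ih =>
    cases l₂ with
    | nil => simp
    | cons y ys => simp only [List.cons_append, List.getLastD_cons, ih]

-- ---------- kids / reach / chains ----------
theorem pv_mem_kids {pairs : List (Int × Int)} {c v : Int} :
    c ∈ pvKids pairs v ↔ (c, v) ∈ pairs := by
  simp only [pvKids, List.mem_map, List.mem_filter]
  constructor
  · rintro ⟨⟨a, b⟩, ⟨hmem, hb⟩, rfl⟩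
    have hb' : b = v := by simpa using hb
    subst hb'; exact hmem
  · intro h
    exact ⟨(c, v), ⟨h, by simp⟩, rfl⟩

theorem pv_step_subset (pairs : List (Int × Int)) : ∀ S : List Int, S ⊆ pvStep pairs S := by
  unfold pvStep
  induction pairs with
  | nil => intro S; simp
  | cons cp rest ih =>
    intro S
    simp only [List.foldl_cons]
    refine List.Subset.trans ?_ (ih _)
    split
    · exact List.subset_append_left _ _
    · exact List.Subset.refl _

theorem pv_one_mem_reach (pairs : List (Int × Int)) : (1 : Int) ∈ pvReach pairs := by
  unfold pvReach
  generalize pairs.length + 1 = n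
  induction n with
  | zero => simp
  | succ k ih =>
    rw [Function.iterate_succ_apply']
    exact pv_step_subset pairs _ ih

theorem pv_step_pred (pairs : List (Int × Int)) (P : Int → Prop)
    (hstab : ∀ cp ∈ pairs, P cp.2 → P cp.1) :
    ∀ S : List Int, (∀ u ∈ S, P u) → ∀ u ∈ pvStep pairs S, P u := by
  unfold pvStep
  induction pairs with
  | nil => intro S hS; simpa using hS
  | cons cp rest ih =>
    intro S hS
    simp only [List.foldl_cons]
    refine ih (fun cp' h' => hstab cp' (by simp [h'])) _ ?_
    split
    · next hcond =>
      intro u hu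
      rcases List.mem_append.mp hu with h | h
      · exact hS u h
      · have : u = cp.1 := by simpa using h
        subst this
        exact hstab cp (by simp) (hS _ hcond.1)
    · exact hS

theorem pv_reach_pred (pairs : List (Int × Int)) (P : Int → Prop)
    (h1 : P 1) (hstab : ∀ cp ∈ pairs, P cp.2 → P cp.1) :
    ∀ u ∈ pvReach pairs, P u := by
  unfold pvReach
  generalize pairs.length + 1 = n
  induction n with
  | zero => simpa using h1
  | succ k ih =>
    rw [Function.iterate_succ_apply']
    exact pv_step_pred pairs P hstab _ ih

theorem pv_chain_append {pairs : List (Int × Int)} :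
    ∀ (cs : List Int) (v : Int) (ds : List Int),
      pvChain pairs v (cs ++ ds) ↔ pvChain pairs v cs ∧ pvChain pairs (cs.getLastD v) ds := by
  intro cs
  induction cs with
  | nil => intro v ds; simp [pvChain]
  | cons c cs ih =>
    intro v ds
    simp only [List.cons_append, pvChain, List.getLastD_cons, ih, and_assoc]

theorem pv_reach_chain {pairs : List (Int × Int)} {u : Int} (hu : u ∈ pvReach pairs) :
    ∃ cs, pvChain pairs 1 cs ∧ cs.getLastD 1 = u := by
  refine pv_reach_pred pairs (fun u => ∃ cs, pvChain pairs 1 cs ∧ cs.getLastD 1 = u) ⟨[], trivial, rfl⟩ ?_ u hu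
  rintro cp hcp ⟨cs, hch, hlast⟩
  refine ⟨cs ++ [cp.1], ?_, ?_⟩
  · rw [pv_chain_append]
    exact ⟨hch, by rw [hlast]; exact ⟨pv_mem_kids.mpr (by simpa using hcp), trivial⟩⟩
  · rw [pv_getLastD_append]; rfl

theorem pv_mem_kids_reach {pairs : List (Int × Int)} (H : pvHyp pairs) {v c : Int}
    (hv : v ∈ pvReach pairs) (hc : c ∈ pvKids pairs v) : c ∈ pvReach pairs :=
  H.1 (c, v) (pv_mem_kids.mp hc) hv

theorem pv_mem_kids_occs {pairs : List (Int × Int)} {v c : Int}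
    (hv : v ∈ pvReach pairs) (hc : c ∈ pvKids pairs v) : c ∈ pvOccs pairs := by
  unfold pvOccs
  exact List.mem_map.mpr ⟨(c, v), List.mem_filter.mpr ⟨pv_mem_kids.mp hc, by simpa using hv⟩, rfl⟩

theorem pv_chain_reach {pairs : List (Int × Int)} (H : pvHyp pairs) :
    ∀ (cs : List Int) (v : Int), v ∈ pvReach pairs → pvChain pairs v cs →
      (∀ c ∈ cs, c ∈ pvReach pairs) ∧ cs.getLastD v ∈ pvReach pairs := by
  intro cs
  induction cs with
  | nil => intro v hv _; exact ⟨by simp, hv⟩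
  | cons c cs ih =>
    intro v hv hch
    have hc : c ∈ pvReach pairs := pv_mem_kids_reach H hv hch.1
    have := ih c hc hch.2
    refine ⟨?_, by rw [List.getLastD_cons]; exact this.2⟩
    intro x hx
    rcases List.mem_cons.mp hx with rfl | hx
    · exact hc
    · exact this.1 x hx

theorem pv_chain_mem_occs {pairs : List (Int × Int)} (H : pvHyp pairs) :
    ∀ (cs : List Int) (v : Int), v ∈ pvReach pairs → pvChain pairs v cs →
      ∀ c ∈ cs, c ∈ pvOccs pairs := by
  intro cs
  induction cs with
  | nil => simp
  | cons c cs ih =>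
    intro v hv hch x hx
    rcases List.mem_cons.mp hx with rfl | hx
    · exact pv_mem_kids_occs hv hch.1
    · exact ih c (pv_mem_kids_reach H hv hch.1) hch.2 x hx

theorem pv_uniq_parent {pairs : List (Int × Int)} (H : pvHyp pairs) {v w c : Int}
    (hv : v ∈ pvReach pairs) (hw : w ∈ pvReach pairs)
    (hcv : c ∈ pvKids pairs v) (hcw : c ∈ pvKids pairs w) : v = w := by
  by_contra hne
  have hpw : (pairs.filter (fun cp => decide (cp.2 ∈ pvReach pairs))).Pairwise
      (fun a b => a.1 ≠ b.1) := List.pairwise_map.mp H.2.1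
  have h1 : (c, v) ∈ pairs.filter (fun cp => decide (cp.2 ∈ pvReach pairs)) :=
    List.mem_filter.mpr ⟨pv_mem_kids.mp hcv, by simpa using hv⟩
  have h2 : (c, w) ∈ pairs.filter (fun cp => decide (cp.2 ∈ pvReach pairs)) :=
    List.mem_filter.mpr ⟨pv_mem_kids.mp hcw, by simpa using hw⟩
  have hsymm : Symmetric (fun (a b : Int × Int) => a.1 ≠ b.1) := fun a b h => h.symm
  have := List.Pairwise.forall hsymm hpw h1 h2 (by simp [hne])
  simp at this

theorem pv_kids_nodup {pairs : List (Int × Int)} (H : pvHyp pairs) {v : Int}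
    (hv : v ∈ pvReach pairs) : (pvKids pairs v).Nodup := by
  unfold pvKids
  have hsub : List.Sublist (pairs.filter (fun cp => cp.2 == v))
      (pairs.filter (fun cp => decide (cp.2 ∈ pvReach pairs))) := by
    refine List.monotone_filter_right pairs ?_
    intro cp h
    have : cp.2 = v := by simpa using h
    simpa [this] using hv
  exact List.Nodup.sublist (hsub.map Prod.fst) H.2.1

-- ---------- unique downward paths ----------
theorem pv_eq_nil_or_append (l : List Int) : l = [] ∨ ∃ l' a, l = l' ++ [a] := by
  rcases List.eq_nil_or_concat l with h | ⟨l', a, h⟩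
  · exact Or.inl h
  · exact Or.inr ⟨l', a, by simpa [List.concat_eq_append] using h⟩

theorem pv_uniqpath {pairs : List (Int × Int)} (H : pvHyp pairs) :
    ∀ (n : Nat) (cs1 cs2 : List Int), cs1.length + cs2.length ≤ n →
      pvChain pairs 1 cs1 → pvChain pairs 1 cs2 →
      cs1.getLastD 1 = cs2.getLastD 1 → cs1 = cs2 := by
  intro n
  induction n with
  | zero =>
    intro cs1 cs2 hlen _ _ _
    have h1 : cs1 = [] := List.eq_nil_of_length_eq_zero (by omega)
    have h2 : cs2 = [] := List.eq_nil_of_length_eq_zero (by omega)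
    rw [h1, h2]
  | succ k ih =>
    intro cs1 cs2 hlen hc1 hc2 hlast
    rcases pv_eq_nil_or_append cs1 with rfl | ⟨xs1, u1, rfl⟩
    · rcases pv_eq_nil_or_append cs2 with rfl | ⟨xs2, u2, rfl⟩
      · rfl
      · exfalso
        rw [pv_chain_append] at hc2
        have hu2 : u2 ∈ pvKids pairs (xs2.getLastD 1) := hc2.2.1
        have hp2 : xs2.getLastD 1 ∈ pvReach pairs :=
          (pv_chain_reach H xs2 1 (pv_one_mem_reach pairs) hc2.1).2
        have : u2 = 1 := by
          have := hlast.symm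
          rwa [pv_getLastD_append, List.getLastD_cons, List.getLastD_nil] at this
        exact H.2.2 (this ▸ pv_mem_kids_occs hp2 hu2)
    · rcases pv_eq_nil_or_append cs2 with rfl | ⟨xs2, u2, rfl⟩
      · exfalso
        rw [pv_chain_append] at hc1
        have hu1 : u1 ∈ pvKids pairs (xs1.getLastD 1) := hc1.2.1
        have hp1 : xs1.getLastD 1 ∈ pvReach pairs :=
          (pv_chain_reach H xs1 1 (pv_one_mem_reach pairs) hc1.1).2
        have : u1 = 1 := by
          have := hlast
          rwa [pv_getLastD_append, List.getLastD_cons, List.getLastD_nil] at this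
        exact H.2.2 (this ▸ pv_mem_kids_occs hp1 hu1)
      · rw [pv_chain_append] at hc1 hc2
        have hlast1 : (xs1 ++ [u1]).getLastD 1 = u1 := by
          rw [pv_getLastD_append, List.getLastD_cons, List.getLastD_nil]
        have hlast2 : (xs2 ++ [u2]).getLastD 1 = u2 := by
          rw [pv_getLastD_append, List.getLastD_cons, List.getLastD_nil]
        have hu : u1 = u2 := by rw [← hlast1, ← hlast2, hlast]
        have hp1 : xs1.getLastD 1 ∈ pvReach pairs :=
          (pv_chain_reach H xs1 1 (pv_one_mem_reach pairs) hc1.1).2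
        have hp2 : xs2.getLastD 1 ∈ pvReach pairs :=
          (pv_chain_reach H xs2 1 (pv_one_mem_reach pairs) hc2.1).2
        have hpar : xs1.getLastD 1 = xs2.getLastD 1 :=
          pv_uniq_parent H hp1 hp2 hc1.2.1 (hu ▸ hc2.2.1)
        have hxs : xs1 = xs2 := by
          refine ih xs1 xs2 ?_ hc1.1 hc2.1 hpar
          simp only [List.length_append, List.length_cons, List.length_nil] at hlen
          omega
        rw [hxs, hu]

theorem pv_rootchain_nodup {pairs : List (Int × Int)} (H : pvHyp pairs) :
    ∀ cs : List Int, pvChain pairs 1 cs → ((1 : Int) :: cs).Nodup := by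
  intro cs
  induction cs using List.reverseRecOn with
  | nil => simp
  | append_singleton xs u ih =>
    intro hch
    rw [pv_chain_append] at hch
    have hnd : ((1 : Int) :: xs).Nodup := ih hch.1
    have hp : xs.getLastD 1 ∈ pvReach pairs :=
      (pv_chain_reach H xs 1 (pv_one_mem_reach pairs) hch.1).2
    have hu : u ∈ pvKids pairs (xs.getLastD 1) := hch.2.1
    have huocc : u ∈ pvOccs pairs := pv_mem_kids_occs hp hu
    have hu1 : u ≠ 1 := fun h => H.2.2 (h ▸ huocc)
    have hunotin : u ∉ xs := by
      intro hmem
      rcases List.append_of_mem hmem with ⟨a, b, rfl⟩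
      have hcha : pvChain pairs 1 (a ++ [u]) ∧ pvChain pairs u b := by
        have := hch.1
        rw [show a ++ u :: b = (a ++ [u]) ++ b by simp] at this
        rw [pv_chain_append] at this
        refine ⟨this.1, ?_⟩
        have hlastau : (a ++ [u]).getLastD 1 = u := by
          rw [pv_getLastD_append, List.getLastD_cons, List.getLastD_nil]
        rw [hlastau] at this
        exact this.2
      have heq : a ++ [u] = (a ++ u :: b) ++ [u] := by
        refine pv_uniqpath H ((a ++ [u]).length + ((a ++ u :: b) ++ [u]).length)
          _ _ le_rfl hcha.1 ?_ ?_
        · rw [pv_chain_append]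
          exact ⟨hch.1, hch.2⟩
        · rw [pv_getLastD_append, pv_getLastD_append, List.getLastD_cons, List.getLastD_nil,
            List.getLastD_cons, List.getLastD_nil]
      have := congrArg List.length heq
      simp at this
    have hfresh : u ∉ (1 : Int) :: xs := by
      intro hmem
      rcases List.mem_cons.mp hmem with h | h
      · exact hu1 h
      · exact hunotin h
    have : (((1 : Int) :: xs) ++ [u]).Nodup := by
      rw [List.nodup_append]
      refine ⟨hnd, by simp, ?_⟩
      have h1 : ¬(1 : Int) = u := fun h => hu1 h.symm
      have h2 : ∀ a ∈ xs, ¬ a = u := fun a ha he => hunotin (he ▸ ha)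
      simpa using ⟨h1, h2⟩
    simpa using this

-- ---------- chain-length bounds ----------
theorem pv_cb_zero_false {pairs : List (Int × Int)} {v : Int} (h : pvCB pairs v 0) : False := by
  have := h [] trivial
  simp at this

theorem pv_cb_mono {pairs : List (Int × Int)} {v : Int} {f g : Nat} (hfg : f ≤ g)
    (h : pvCB pairs v f) : pvCB pairs v g := fun cs hcs => lt_of_lt_of_le (h cs hcs) hfg

theorem pv_cb_kid {pairs : List (Int × Int)} {v c : Int} {f : Nat}
    (h : pvCB pairs v (f + 1)) (hc : c ∈ pvKids pairs v) : pvCB pairs c f := by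
  intro cs hcs
  have := h (c :: cs) ⟨hc, hcs⟩
  simpa [Nat.lt_succ_iff] using this

theorem pv_chain_len_le {pairs : List (Int × Int)} (H : pvHyp pairs) {v : Int} {cs : List Int}
    (hv : v ∈ pvReach pairs) (hch : pvChain pairs v cs) : cs.length ≤ (pvOccs pairs).length := by
  rcases pv_reach_chain hv with ⟨cs0, hch0, hlast0⟩
  have hfull : pvChain pairs 1 (cs0 ++ cs) := by
    rw [pv_chain_append, hlast0]
    exact ⟨hch0, hch⟩
  have hnd : ((1 : Int) :: (cs0 ++ cs)).Nodup := pv_rootchain_nodup H _ hfull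
  have hcsnd : cs.Nodup := by
    have : (cs0 ++ cs).Nodup := (List.nodup_cons.mp hnd).2
    exact ((List.nodup_append.mp this)).2.1
  have hsub : cs ⊆ pvOccs pairs := by
    intro c hc
    exact pv_chain_mem_occs H (cs0 ++ cs) 1 (pv_one_mem_reach pairs) hfull c
      (List.mem_append_right _ hc)
  exact pv_nodup_length_le hcsnd hsub

theorem pv_cb_all {pairs : List (Int × Int)} (H : pvHyp pairs) {v : Int}
    (hv : v ∈ pvReach pairs) : pvCB pairs v ((pvOccs pairs).length + 1) := by
  intro cs hcs
  have := pv_chain_len_le H hv hcs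
  omega

theorem pv_cb_kid_occs {pairs : List (Int × Int)} (H : pvHyp pairs) {v c : Int}
    (hv : v ∈ pvReach pairs) (hc : c ∈ pvKids pairs v) : pvCB pairs c (pvOccs pairs).length := by
  intro cs hcs
  have := pv_chain_len_le H hv (show pvChain pairs v (c :: cs) from ⟨hc, hcs⟩)
  simp only [List.length_cons] at this
  omega

-- ---------- descendant lists ----------
theorem pv_mem_desc_self (pairs : List (Int × Int)) : ∀ (f : Nat) (v : Int), v ∈ pvDesc pairs f v := by
  intro f v
  cases f <;> simp [pvDesc]

theorem pv_chain_desc {pairs : List (Int × Int)} :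
    ∀ (cs : List Int) (v : Int) (f : Nat), pvChain pairs v cs → cs.length ≤ f →
      cs.getLastD v ∈ pvDesc pairs f v := by
  intro cs
  induction cs with
  | nil => intro v f _ _; exact pv_mem_desc_self pairs f v
  | cons c cs ih =>
    intro v f hch hlen
    simp only [List.length_cons] at hlen
    obtain ⟨f', rfl⟩ : ∃ f', f = f' + 1 := ⟨f - 1, by omega⟩
    rw [List.getLastD_cons]
    simp only [pvDesc, List.mem_cons, List.mem_flatMap]
    exact Or.inr ⟨c, hch.1, ih c f' hch.2 (by omega)⟩

theorem pv_desc_chain {pairs : List (Int × Int)} :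
    ∀ (f : Nat) (v u : Int), u ∈ pvDesc pairs f v →
      ∃ cs, pvChain pairs v cs ∧ cs.getLastD v = u ∧ cs.length ≤ f := by
  intro f
  induction f with
  | zero =>
    intro v u hu
    have : u = v := by simpa [pvDesc] using hu
    exact ⟨[], trivial, this.symm ▸ rfl, by simp⟩
  | succ f' ih =>
    intro v u hu
    simp only [pvDesc, List.mem_cons, List.mem_flatMap] at hu
    rcases hu with rfl | ⟨c, hc, hu⟩
    · exact ⟨[], trivial, rfl, by simp⟩
    · rcases ih c u hu with ⟨cs, hch, hlast, hlen⟩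
      exact ⟨c :: cs, ⟨hc, hch⟩, by rw [List.getLastD_cons]; exact hlast, by simpa using Nat.succ_le_succ hlen⟩

theorem pv_desc_reach {pairs : List (Int × Int)} (H : pvHyp pairs) {v u : Int} {f : Nat}
    (hv : v ∈ pvReach pairs) (hu : u ∈ pvDesc pairs f v) : u ∈ pvReach pairs := by
  rcases pv_desc_chain f v u hu with ⟨cs, hch, hlast, _⟩
  exact hlast ▸ (pv_chain_reach H cs v hv hch).2

theorem pv_desc_disjoint_sib {pairs : List (Int × Int)} (H : pvHyp pairs) {v c1 c2 u : Int}
    {f1 f2 : Nat} (hv : v ∈ pvReach pairs) (hc1 : c1 ∈ pvKids pairs v) (hc2 : c2 ∈ pvKids pairs v)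
    (hne : c1 ≠ c2) (hu1 : u ∈ pvDesc pairs f1 c1) (hu2 : u ∈ pvDesc pairs f2 c2) : False := by
  rcases pv_reach_chain hv with ⟨cs0, hch0, hlast0⟩
  rcases pv_desc_chain f1 c1 u hu1 with ⟨ds1, hd1, hl1, _⟩
  rcases pv_desc_chain f2 c2 u hu2 with ⟨ds2, hd2, hl2, _⟩
  have hfull1 : pvChain pairs 1 (cs0 ++ c1 :: ds1) := by
    rw [pv_chain_append, hlast0]
    exact ⟨hch0, hc1, hd1⟩
  have hfull2 : pvChain pairs 1 (cs0 ++ c2 :: ds2) := by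
    rw [pv_chain_append, hlast0]
    exact ⟨hch0, hc2, hd2⟩
  have heq := pv_uniqpath H ((cs0 ++ c1 :: ds1).length + (cs0 ++ c2 :: ds2).length)
    _ _ le_rfl hfull1 hfull2 (by
      rw [pv_getLastD_append, pv_getLastD_append, List.getLastD_cons, List.getLastD_cons, hl1, hl2])
  have := List.append_cancel_left heq
  exact hne (by injection this)

theorem pv_desc_not_anc {pairs : List (Int × Int)} (H : pvHyp pairs) {v c : Int} {f : Nat}
    (hv : v ∈ pvReach pairs) (hc : c ∈ pvKids pairs v) : v ∉ pvDesc pairs f c := by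
  intro hmem
  rcases pv_reach_chain hv with ⟨cs0, hch0, hlast0⟩
  rcases pv_desc_chain f c v hmem with ⟨ds, hd, hl, _⟩
  have hfull : pvChain pairs 1 (cs0 ++ c :: ds) := by
    rw [pv_chain_append, hlast0]
    exact ⟨hch0, hc, hd⟩
  have heq := pv_uniqpath H (cs0.length + (cs0 ++ c :: ds).length) _ _ le_rfl hch0 hfull (by
    rw [pv_getLastD_append, List.getLastD_cons, hlast0, hl])
  have := congrArg List.length heq
  simp at this

theorem pv_desc_nodup {pairs : List (Int × Int)} (H : pvHyp pairs) :
    ∀ (f : Nat) (v : Int), v ∈ pvReach pairs → (pvDesc pairs f v).Nodup := by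
  intro f
  induction f with
  | zero => intro v _; simp [pvDesc]
  | succ f' ih =>
    intro v hv
    simp only [pvDesc, List.nodup_cons]
    constructor
    · intro hmem
      rcases List.mem_flatMap.mp hmem with ⟨c, hc, hvc⟩
      exact pv_desc_not_anc H hv hc hvc
    · have haux : ∀ ks : List Int, (∀ c ∈ ks, c ∈ pvKids pairs v) → ks.Nodup →
          (ks.flatMap (pvDesc pairs f')).Nodup := by
        intro ks
        induction ks with
        | nil => simp
        | cons c ks ihk =>
          intro hks hnd
          simp only [List.flatMap_cons, List.nodup_append]
          refine ⟨ih c (pv_mem_kids_reach H hv (hks c (by simp))),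
            ihk (fun x hx => hks x (by simp [hx])) (List.nodup_cons.mp hnd).2, ?_⟩
          intro u hu1 w hw
          rintro rfl
          rcases List.mem_flatMap.mp hw with ⟨c', hc', hu2'⟩
          have hne : c ≠ c' := by
            intro h
            exact (List.nodup_cons.mp hnd).1 (h ▸ hc')
          exact pv_desc_disjoint_sib H hv (hks c (by simp)) (hks c' (by simp [hc']))
            hne hu1 hu2' 
      exact haux _ (fun c hc => hc) (pv_kids_nodup H hv)

theorem pv_desc_stab {pairs : List (Int × Int)} :
    ∀ (f : Nat) (v : Int) (g : Nat), pvCB pairs v f → f ≤ g → pvDesc pairs g v = pvDesc pairs f v := by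
  intro f
  induction f with
  | zero => intro v g hcb _; exact absurd hcb pv_cb_zero_false
  | succ f' ih =>
    intro v g hcb hle
    obtain ⟨g', rfl⟩ : ∃ g', g = g' + 1 := ⟨g - 1, by omega⟩
    simp only [pvDesc]
    congr 1
    exact pv_flatMap_congr (fun c hc => ih c g' (pv_cb_kid hcb hc) (by omega))

theorem pv_desc_root_mem {pairs : List (Int × Int)} (H : pvHyp pairs) {u : Int} {f : Nat}
    (hocc : (pvOccs pairs).length ≤ f) (hu : u ∈ pvReach pairs) : u ∈ pvDesc pairs f 1 := by
  rcases pv_reach_chain hu with ⟨cs, hch, hlast⟩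
  have hnd : ((1 : Int) :: cs).Nodup := pv_rootchain_nodup H cs hch
  have hlen : cs.length ≤ (pvOccs pairs).length :=
    pv_nodup_length_le (List.nodup_cons.mp hnd).2
      (fun c hc => pv_chain_mem_occs H cs 1 (pv_one_mem_reach pairs) hch c hc)
  exact hlast ▸ pv_chain_desc cs 1 f hch (by omega)

-- occs is never longer than the edge list
theorem pv_occs_len_le (pairs : List (Int × Int)) : (pvOccs pairs).length ≤ pairs.length := by
  unfold pvOccs
  rw [List.length_map]
  exact List.length_filter_le _ _

-- subtree-size fixpoint equation for the stable size
theorem pv_szfix {pairs : List (Int × Int)} (H : pvHyp pairs) {v : Int}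
    (hv : v ∈ pvReach pairs) :
    pvSZ pairs v = 1 + ((pvKids pairs v).map (pvSZ pairs)).sum := by
  have hL : (pvOccs pairs).length + 1 ≤ pvF pairs := by
    have := pv_occs_len_le pairs
    simp only [pvF]; omega
  unfold pvSZ pvSzN
  have h1 : pvDesc pairs (pvF pairs) v = pvDesc pairs ((pvOccs pairs).length + 1) v :=
    pv_desc_stab ((pvOccs pairs).length + 1) v (pvF pairs) (pv_cb_all H hv) hL
  rw [h1]
  simp only [pvDesc, List.length_cons, List.length_flatMap]
  have h2 : (pvKids pairs v).map (fun c => (pvDesc pairs (pvOccs pairs).length c).length)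
      = (pvKids pairs v).map (fun c => (pvDesc pairs (pvF pairs) c).length) :=
    List.map_congr_left (fun c hc => by
      rw [pv_desc_stab (pvOccs pairs).length c (pvF pairs) (pv_cb_kid_occs H hv hc)
        (by have := pv_occs_len_le pairs; simp only [pvF]; omega)])
  rw [h2, Nat.cast_add, Nat.cast_one, Nat.cast_list_sum, List.map_map]
  simp only [Function.comp_def]
  omega

theorem pv_red_nonneg (pairs : List (Int × Int)) : ∀ (f : Nat) (v : Int), 0 ≤ pvRed pairs f v := by
  intro f
  induction f with
  | zero => intro v; simp [pvRed]
  | succ f' ih =>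
    intro v
    refine List.sum_nonneg ?_
    intro x hx
    rcases List.mem_map.mp hx with ⟨c, _, rfl⟩
    simp only
    split
    · exact le_refl 0
    · have := ih c; omega

theorem pv_red_parity (pairs : List (Int × Int)) :
    ∀ (f : Nat) (v : Int), (pvRed pairs f v + 1) % 2 = pvSzN pairs f v % 2 := by
  intro f
  induction f with
  | zero => intro v; simp [pvRed, pvSzN, pvDesc]
  | succ f' ih =>
    intro v
    have hterm : ∀ c ∈ pvKids pairs v,
        (fun c => let k := pvRed pairs f' c + 1;
          if 1 < k ∧ PySem.Int.mod k 2 = 0 then 0 else k) c % 2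
          = (fun c => pvSzN pairs f' c) c % 2 := by
      intro c _
      simp only
      split
      · next hcond =>
        have h2 : PySem.Int.mod (pvRed pairs f' c + 1) 2 = (pvRed pairs f' c + 1) % 2 :=
          PySem.Int.mod_eq_emod_of_pos (by norm_num : (0:Int) < 2)
        have := ih c
        rw [h2] at hcond
        omega
      · exact ih c
    have hsum := pv_sum_parity (pvKids pairs v) _ _ hterm
    have hcast : pvSzN pairs (f' + 1) v
        = 1 + ((pvKids pairs v).map (fun c => pvSzN pairs f' c)).sum := by
      simp only [pvSzN, pvDesc, List.length_cons, List.length_flatMap]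
      rw [Nat.cast_add, Nat.cast_one, Nat.cast_list_sum, List.map_map]
      simp only [Function.comp_def]
      omega
    rw [hcast]
    show (((pvKids pairs v).map (fun c => let k := pvRed pairs f' c + 1;
      if 1 < k ∧ PySem.Int.mod k 2 = 0 then 0 else k)).sum + 1) % 2 = _
    omega

-- ---------- the children lists both ports read ----------
theorem pv_goc_getD (m : PySem.Dict Int (List Int)) (w x : Int) :
    (pvGetOrCreate m w).getD x [] = m.getD x [] := by
  unfold pvGetOrCreate
  split
  · rfl
  · next hnc =>
    rw [PySem.Dict.getD_insert]
    split
    · next hx =>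
      subst hx
      exact (PySem.Dict.getD_of_not_contains m [] (by simpa using hnc)).symm
    · rfl

theorem pv_nodesMap_aux (v : Int) :
    ∀ (pairs : List (Int × Int)) (m : PySem.Dict Int (List Int)),
      (pairs.foldl (fun m cp =>
        let m1 := pvGetOrCreate m cp.1
        let m2 := pvGetOrCreate m1 cp.2
        m2.insert cp.2 (m2.getD cp.2 [] ++ [cp.1])) m).getD v []
      = m.getD v [] ++ (pairs.filter (fun cp => cp.2 == v)).map Prod.fst := by
  intro pairs
  induction pairs with
  | nil => intro m; simp
  | cons cp rest ih =>
    intro m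
    simp only [List.foldl_cons]
    rw [ih]
    have hstep : ((pvGetOrCreate (pvGetOrCreate m cp.1) cp.2).insert cp.2
        ((pvGetOrCreate (pvGetOrCreate m cp.1) cp.2).getD cp.2 [] ++ [cp.1])).getD v []
        = if cp.2 = v then m.getD v [] ++ [cp.1] else m.getD v [] := by
      rw [PySem.Dict.getD_insert]
      split
      · next h => subst h; rw [if_pos rfl, pv_goc_getD, pv_goc_getD]
      · next h => rw [if_neg (fun hh => h hh.symm), pv_goc_getD, pv_goc_getD]
    rw [hstep]
    by_cases h : cp.2 = v
    · simp [h, List.append_assoc]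
    · simp [h]

theorem pv_cmap_getD (pairs : List (Int × Int)) (v : Int) :
    (pvNodesMap pairs).getD v [] = pvKids pairs v := by
  unfold pvNodesMap pvKids
  rw [pv_nodesMap_aux]
  have : ((PySem.Dict.empty : PySem.Dict Int (List Int)).insert 1 []).getD v [] = [] := by
    rw [PySem.Dict.getD_insert]
    split <;> simp [PySem.Dict.getD_empty]
  rw [this, List.nil_append]

theorem pv_adj_getD (pairs : List (Int × Int)) (v : Int) :
    (pvAdj pairs).getD v [] = pvKids pairs v := by
  unfold pvAdj pvKids
  have hfold : pairs.foldl (fun m cp => m.modify cp.2 [] (fun l => l ++ [cp.1])) PySem.Dict.empty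
      = (pairs.map Prod.swap).foldl (fun m p => m.modify p.1 [] (fun l => l ++ [p.2])) PySem.Dict.empty := by
    rw [List.foldl_map]
    rfl
  rw [hfold, PySem.Dict.getD_foldl_modify_append]
  rw [PySem.Dict.getD_empty, List.nil_append, List.filter_map, List.map_map]
  rfl

-- A's detach condition on the counter is exactly "this subtree has even size"
theorem pv_cond_iff (pairs : List (Int × Int)) (f : Nat) (c : Int) :
    ((1 < pvRed pairs f c + 1 ∧ PySem.Int.mod (pvRed pairs f c + 1) 2 = 0)
      ↔ pvSzN pairs f c % 2 = 0) := by
  have hmod : PySem.Int.mod (pvRed pairs f c + 1) 2 = (pvRed pairs f c + 1) % 2 :=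
    PySem.Int.mod_eq_emod_of_pos (by norm_num : (0:Int) < 2)
  have hpar := pv_red_parity pairs f c
  have hnn := pv_red_nonneg pairs f c
  rw [hmod]
  omega

theorem pv_desc_head (pairs : List (Int × Int)) (f : Nat) (c : Int) :
    pvDesc pairs f c = c :: (pvDesc pairs f c).tail := by
  cases f <;> simp [pvDesc]

theorem pv_countP_desc (pairs : List (Int × Int)) (f : Nat) (c : Int) (p : Int → Bool) :
    (pvDesc pairs f c).countP p = (pvDesc pairs f c).tail.countP p + (if p c then 1 else 0) := by
  conv_lhs => rw [pv_desc_head pairs f c]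
  rw [List.countP_cons]

theorem pv_evc_countP {pairs : List (Int × Int)} (H : pvHyp pairs) :
    ∀ (f : Nat) (v : Int), f ≤ pvF pairs → v ∈ pvReach pairs → pvCB pairs v f →
      pvEvc pairs f v
        = (((pvDesc pairs f v).tail.countP (fun u => decide (pvSZ pairs u % 2 = 0)) : Nat) : Int) := by
  intro f
  induction f with
  | zero => intro v _ _ hcb; exact absurd hcb pv_cb_zero_false
  | succ f' ih =>
    intro v hle hv hcb
    have htail : (pvDesc pairs (f' + 1) v).tail = (pvKids pairs v).flatMap (pvDesc pairs f') := by
      simp [pvDesc]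
    rw [htail, pv_countP_flatMap]
    have hterm : ∀ c ∈ pvKids pairs v,
        (pvEvc pairs f' c + if pvSzN pairs f' c % 2 = 0 then (1:Int) else 0)
        = (((pvDesc pairs f' c).countP (fun u => decide (pvSZ pairs u % 2 = 0)) : Nat) : Int) := by
      intro c hc
      have hcR : c ∈ pvReach pairs := pv_mem_kids_reach H hv hc
      have hcbc : pvCB pairs c f' := pv_cb_kid hcb hc
      have hstab : pvSZ pairs c = pvSzN pairs f' c := by
        unfold pvSZ pvSzN
        rw [pv_desc_stab f' c (pvF pairs) hcbc (by omega)]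
      rw [pv_countP_desc pairs f' c _]
      push_cast
      rw [ih c (by omega) hcR hcbc]
      by_cases hev : pvSzN pairs f' c % 2 = 0 <;> simp [hev, hstab]
    calc pvEvc pairs (f' + 1) v
        = ((pvKids pairs v).map (fun c =>
            pvEvc pairs f' c + if pvSzN pairs f' c % 2 = 0 then (1:Int) else 0)).sum := rfl
      _ = ((pvKids pairs v).map (fun c =>
            (((pvDesc pairs f' c).countP (fun u => decide (pvSZ pairs u % 2 = 0)) : Nat) : Int))).sum := by
          exact congrArg List.sum (List.map_congr_left hterm)
      _ = _ := by
          rw [Nat.cast_list_sum, List.map_map]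
          simp [Function.comp_def]

-- ---------- A's recursion computes pvEvc / pvRed ----------
theorem pv_goA_spec {pairs : List (Int × Int)} (H : pvHyp pairs) :
    ∀ (f : Nat) (v : Int) (tc : PySem.Dict Int Int),
      v ∈ pvReach pairs → pvCB pairs v f →
      (∀ u ∈ pvDesc pairs f v, tc.getD u 0 = 0) →
      ((pvGoA (pvNodesMap pairs) f v tc).1 = pvEvc pairs f v
       ∧ (pvGoA (pvNodesMap pairs) f v tc).2.getD v 0 = pvRed pairs f v
       ∧ ∀ u, u ∉ pvDesc pairs f v →
           (pvGoA (pvNodesMap pairs) f v tc).2.getD u 0 = tc.getD u 0) := by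
  intro f
  induction f with
  | zero => intro v tc _ hcb _; exact absurd hcb pv_cb_zero_false
  | succ g ih =>
    intro v tc hv hcb hz
    have hkids := pv_cmap_getD pairs v
    by_cases hch : pvKids pairs v = []
    · have hred : pvGoA (pvNodesMap pairs) (g+1) v tc = (0, tc.insert v 0) := by
        simp only [pvGoA, hkids, hch]
        rw [if_pos trivial]
      rw [hred]
      refine ⟨by simp [pvEvc, hch], ?_, ?_⟩
      · simp [pvRed, hch]
      · intro u hu
        have hune : u ≠ v := by
          simp only [pvDesc, hch, List.flatMap_nil, List.mem_cons] at hu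
          intro h; exact hu (Or.inl h)
        rw [PySem.Dict.getD_insert, if_neg hune]
    · -- every child is reachable, bounded, with pairwise disjoint subtrees
      have hkR : ∀ c ∈ pvKids pairs v, c ∈ pvReach pairs :=
        fun c hc => pv_mem_kids_reach H hv hc
      have hkcb : ∀ c ∈ pvKids pairs v, pvCB pairs c g := fun c hc => pv_cb_kid hcb hc
      have hvnotk : v ∉ pvKids pairs v :=
        fun h => pv_desc_not_anc H hv h (pv_mem_desc_self pairs g v)
      have hvnotd : ∀ c ∈ pvKids pairs v, v ∉ pvDesc pairs g c :=
        fun c hc => pv_desc_not_anc H hv hc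
      -- loop 1: the recursive calls
      have L1 : ∀ cs : List Int, (∀ c ∈ cs, c ∈ pvKids pairs v) → cs.Nodup →
          ∀ (acc : Int) (tc0 : PySem.Dict Int Int),
            (∀ c ∈ cs, ∀ u ∈ pvDesc pairs g c, tc0.getD u 0 = 0) →
            ((cs.foldl (fun (p : Int × PySem.Dict Int Int) c =>
                (p.1 + (pvGoA (pvNodesMap pairs) g c p.2).1,
                  (pvGoA (pvNodesMap pairs) g c p.2).2)) (acc, tc0)).1
                = acc + (cs.map (pvEvc pairs g)).sum
             ∧ (∀ c ∈ cs, (cs.foldl (fun (p : Int × PySem.Dict Int Int) c =>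
                (p.1 + (pvGoA (pvNodesMap pairs) g c p.2).1,
                  (pvGoA (pvNodesMap pairs) g c p.2).2)) (acc, tc0)).2.getD c 0 = pvRed pairs g c)
             ∧ ∀ u, (∀ c ∈ cs, u ∉ pvDesc pairs g c) →
                (cs.foldl (fun (p : Int × PySem.Dict Int Int) c =>
                (p.1 + (pvGoA (pvNodesMap pairs) g c p.2).1,
                  (pvGoA (pvNodesMap pairs) g c p.2).2)) (acc, tc0)).2.getD u 0 = tc0.getD u 0) := by
        intro cs
        induction cs with
        | nil => intro _ _ acc tc0 _; exact ⟨by simp, by simp, fun u _ => rfl⟩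
        | cons c cs' ihc =>
          intro hsub hnd acc tc0 hz0
          have hcK : c ∈ pvKids pairs v := hsub c (by simp)
          have hrec := ih c tc0 (hkR c hcK) (hkcb c hcK) (hz0 c (by simp))
          have hdisj : ∀ c' ∈ cs', ∀ u, u ∈ pvDesc pairs g c' → u ∉ pvDesc pairs g c := by
            intro c' hc' u hu1 hu2
            have hne : c ≠ c' := fun h => (List.nodup_cons.mp hnd).1 (h ▸ hc')
            exact pv_desc_disjoint_sib H hv hcK (hsub c' (by simp [hc'])) hne hu2 hu1
          have hz1 : ∀ c' ∈ cs', ∀ u ∈ pvDesc pairs g c',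
              (pvGoA (pvNodesMap pairs) g c tc0).2.getD u 0 = 0 := by
            intro c' hc' u hu
            rw [hrec.2.2 u (hdisj c' hc' u hu)]
            exact hz0 c' (by simp [hc']) u hu
          have hihc := ihc (fun c' hc' => hsub c' (by simp [hc'])) (List.nodup_cons.mp hnd).2
            (acc + (pvGoA (pvNodesMap pairs) g c tc0).1) (pvGoA (pvNodesMap pairs) g c tc0).2 hz1
          simp only [List.foldl_cons]
          refine ⟨?_, ?_, ?_⟩
          · rw [hihc.1]
            simp only [List.map_cons, List.sum_cons, hrec.1]
            ring
          · intro c'' hc''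
            rcases List.mem_cons.mp hc'' with rfl | hc''
            · have hcnot : ∀ c' ∈ cs', c'' ∉ pvDesc pairs g c' := by
                intro c' hc' hmem
                exact (hdisj c' hc' c'' hmem) (pv_mem_desc_self pairs g c'')
              rw [hihc.2.2 c'' hcnot]
              exact hrec.2.1
            · exact hihc.2.1 c'' hc''
          · intro u hu
            rw [hihc.2.2 u (fun c' hc' => hu c' (by simp [hc']))]
            exact hrec.2.2 u (hu c (by simp))
      -- loop 2: the detach pass
      have L2 : ∀ cs : List Int, (∀ c ∈ cs, c ∈ pvKids pairs v) → cs.Nodup →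
          ∀ (ev total : Int) (tc0 : PySem.Dict Int Int),
            (∀ c ∈ cs, tc0.getD c 0 = pvRed pairs g c) →
            ((cs.foldl (fun (p : Int × Int × PySem.Dict Int Int) c =>
                if 1 < p.2.2.getD c 0 + 1 ∧ PySem.Int.mod (p.2.2.getD c 0 + 1) 2 = 0 then
                  (p.1 + 1, p.2.1, p.2.2.insert c 0)
                else (p.1, p.2.1 + (p.2.2.getD c 0 + 1), p.2.2)) (ev, total, tc0)).1
                = ev + (cs.map (fun c => if pvSzN pairs g c % 2 = 0 then (1:Int) else 0)).sum
             ∧ (cs.foldl (fun (p : Int × Int × PySem.Dict Int Int) c =>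
                if 1 < p.2.2.getD c 0 + 1 ∧ PySem.Int.mod (p.2.2.getD c 0 + 1) 2 = 0 then
                  (p.1 + 1, p.2.1, p.2.2.insert c 0)
                else (p.1, p.2.1 + (p.2.2.getD c 0 + 1), p.2.2)) (ev, total, tc0)).2.1
                = total + (cs.map (fun c =>
                    if 1 < pvRed pairs g c + 1 ∧ PySem.Int.mod (pvRed pairs g c + 1) 2 = 0 then 0
                    else pvRed pairs g c + 1)).sum
             ∧ ∀ u, u ∉ cs →
                (cs.foldl (fun (p : Int × Int × PySem.Dict Int Int) c =>
                if 1 < p.2.2.getD c 0 + 1 ∧ PySem.Int.mod (p.2.2.getD c 0 + 1) 2 = 0 then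
                  (p.1 + 1, p.2.1, p.2.2.insert c 0)
                else (p.1, p.2.1 + (p.2.2.getD c 0 + 1), p.2.2)) (ev, total, tc0)).2.2.getD u 0
                = tc0.getD u 0) := by
        intro cs
        induction cs with
        | nil => intro _ _ ev total tc0 _; exact ⟨by simp, by simp, fun u _ => rfl⟩
        | cons c cs' ihc =>
          intro hsub hnd ev total tc0 hval
          have hkc : tc0.getD c 0 = pvRed pairs g c := hval c (by simp)
          simp only [List.foldl_cons, hkc]
          by_cases hcond : 1 < pvRed pairs g c + 1 ∧ PySem.Int.mod (pvRed pairs g c + 1) 2 = 0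
          · rw [if_pos hcond]
            have hval' : ∀ c' ∈ cs', (tc0.insert c 0).getD c' 0 = pvRed pairs g c' := by
              intro c' hc'
              have hne : c' ≠ c := fun h => (List.nodup_cons.mp hnd).1 (h ▸ hc')
              rw [PySem.Dict.getD_insert_of_ne tc0 0 0 hne]
              exact hval c' (by simp [hc'])
            have hihc := ihc (fun c' hc' => hsub c' (by simp [hc'])) (List.nodup_cons.mp hnd).2
              (ev + 1) total (tc0.insert c 0) hval'
            refine ⟨?_, ?_, ?_⟩
            · rw [hihc.1]
              have hsz : pvSzN pairs g c % 2 = 0 := (pv_cond_iff pairs g c).mp hcond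
              simp only [List.map_cons, List.sum_cons]
              rw [if_pos hsz]
              ring
            · rw [hihc.2.1]
              simp only [List.map_cons, List.sum_cons, if_pos hcond]
              ring
            · intro u hu
              rw [hihc.2.2 u (fun h => hu (by simp [h]))]
              exact PySem.Dict.getD_insert_of_ne tc0 0 0 (fun h => hu (by simp [h]))
          · rw [if_neg hcond]
            have hihc := ihc (fun c' hc' => hsub c' (by simp [hc'])) (List.nodup_cons.mp hnd).2
              ev (total + (pvRed pairs g c + 1)) tc0 (fun c' hc' => hval c' (by simp [hc']))
            refine ⟨?_, ?_, ?_⟩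
            · rw [hihc.1]
              have hsz : ¬ pvSzN pairs g c % 2 = 0 := fun h => hcond ((pv_cond_iff pairs g c).mpr h)
              simp only [List.map_cons, List.sum_cons]
              rw [if_neg hsz]
              ring
            · rw [hihc.2.1]
              simp only [List.map_cons, List.sum_cons, if_neg hcond]
              ring
            · intro u hu
              exact hihc.2.2 u (fun h => hu (by simp [h]))
      -- assemble
      have hzk : ∀ c ∈ pvKids pairs v, ∀ u ∈ pvDesc pairs g c, tc.getD u 0 = 0 := by
        intro c hc u hu
        refine hz u ?_
        simp only [pvDesc, List.mem_cons, List.mem_flatMap]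
        exact Or.inr ⟨c, hc, hu⟩
      obtain ⟨A1, A2, A3⟩ := L1 (pvKids pairs v) (fun c hc => hc) (pv_kids_nodup H hv) 0 tc hzk
      obtain ⟨B1, B2, B3⟩ := L2 (pvKids pairs v) (fun c hc => hc) (pv_kids_nodup H hv)
        (((pvKids pairs v).foldl (fun (p : Int × PySem.Dict Int Int) c =>
            (p.1 + (pvGoA (pvNodesMap pairs) g c p.2).1,
              (pvGoA (pvNodesMap pairs) g c p.2).2)) (0, tc)).1) 0
        (((pvKids pairs v).foldl (fun (p : Int × PySem.Dict Int Int) c =>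
            (p.1 + (pvGoA (pvNodesMap pairs) g c p.2).1,
              (pvGoA (pvNodesMap pairs) g c p.2).2)) (0, tc)).2) A2
      have hvz : (((pvKids pairs v).foldl (fun (p : Int × Int × PySem.Dict Int Int) c =>
            if 1 < p.2.2.getD c 0 + 1 ∧ PySem.Int.mod (p.2.2.getD c 0 + 1) 2 = 0 then
              (p.1 + 1, p.2.1, p.2.2.insert c 0)
            else (p.1, p.2.1 + (p.2.2.getD c 0 + 1), p.2.2))
            ((((pvKids pairs v).foldl (fun (p : Int × PySem.Dict Int Int) c =>
              (p.1 + (pvGoA (pvNodesMap pairs) g c p.2).1,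
                (pvGoA (pvNodesMap pairs) g c p.2).2)) (0, tc)).1), 0,
             (((pvKids pairs v).foldl (fun (p : Int × PySem.Dict Int Int) c =>
              (p.1 + (pvGoA (pvNodesMap pairs) g c p.2).1,
                (pvGoA (pvNodesMap pairs) g c p.2).2)) (0, tc)).2))).2.2.getD v 0) = 0 := by
        rw [B3 v hvnotk, A3 v hvnotd]
        exact hz v (by simp [pvDesc])
      simp only [pvGoA, hkids]
      rw [if_neg hch]
      refine ⟨?_, ?_, ?_⟩
      · simp only
        rw [B1, A1]
        simp only [pvEvc]
        rw [PySem.List.sum_map_add_int]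
        ring
      · simp only
        rw [PySem.Dict.getD_insert, if_pos rfl, hvz, B2]
        simp only [pvRed]
        ring
      · intro u hu
        have hune : u ≠ v := by
          intro h
          exact hu (h ▸ pv_mem_desc_self pairs (g+1) v)
        have hunotk : u ∉ pvKids pairs v := by
          intro h
          refine hu ?_
          simp only [pvDesc, List.mem_cons, List.mem_flatMap]
          exact Or.inr ⟨u, h, pv_mem_desc_self pairs g u⟩
        have hunotd : ∀ c ∈ pvKids pairs v, u ∉ pvDesc pairs g c := by
          intro c hc hmem
          refine hu ?_
          simp only [pvDesc, List.mem_cons, List.mem_flatMap]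
          exact Or.inr ⟨c, hc, hmem⟩
        simp only
        rw [PySem.Dict.getD_insert, if_neg hune, B3 u hunotk, A3 u hunotd]

-- ---------- B's BFS produces each reachable node once, parents first ----------
def pvInv (pairs : List (Int × Int)) (o : List (Int × Option Int)) (i : Nat) : Prop :=
  o.head? = some (1, none) ∧
  (o.map Prod.fst).Nodup ∧
  (∀ e ∈ o, e.1 ∈ pvReach pairs) ∧
  (∀ j, (hj : j < o.length) → 0 < j → ∃ p, o[j].2 = some p ∧ o[j].1 ∈ pvKids pairs p ∧
      ∃ k, ∃ hk : k < o.length, k < j ∧ k < i ∧ o[k].1 = p) ∧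
  (∀ k, (hk : k < o.length) → k < i → ∀ c ∈ pvKids pairs o[k].1,
      ∃ j, ∃ hj : j < o.length, k < j ∧ o[j].1 = c)

theorem pv_inv_len {pairs : List (Int × Int)} (H : pvHyp pairs) {o : List (Int × Option Int)}
    {i : Nat} (hinv : pvInv pairs o i) : o.length ≤ (pvOccs pairs).length + 1 := by
  have hsub : o.map Prod.fst ⊆ (1 : Int) :: pvOccs pairs := by
    intro u hu
    rcases List.mem_iff_getElem.mp hu with ⟨j, hj, hju⟩
    rw [List.length_map] at hj
    rw [List.getElem_map] at hju
    rcases Nat.eq_zero_or_pos j with rfl | hpos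
    · have : o[0] = (1, none) := by
        have := hinv.1
        rwa [List.head?_eq_getElem?, List.getElem?_eq_getElem hj, Option.some_inj] at this
      rw [this] at hju
      simp [← hju]
    · rcases hinv.2.2.2.1 j hj hpos with ⟨p, _, hkid, k, hk, _, _, hkp⟩
      have hpR : p ∈ pvReach pairs := hkp ▸ hinv.2.2.1 o[k] (o.getElem_mem hk)
      have : u ∈ pvOccs pairs := hju ▸ pv_mem_kids_occs hpR hkid
      simp [this]
  have := pv_nodup_length_le hinv.2.1 hsub
  simpa using this

theorem pv_bfs_fold (v : Int) : ∀ (ks : List Int) (o' : List (Int × Option Int)) (s : List Int),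
    ks.Nodup → (∀ c ∈ ks, c ∉ s) →
    ks.foldl (fun (p : List (Int × Option Int) × PySem.Set Int) c =>
        if PySem.Set.contains p.2 c then p
        else (p.1 ++ [(c, some v)], PySem.Set.add p.2 c)) (o', s)
      = (o' ++ ks.map (fun c => (c, some v)), s ++ ks) := by
  intro ks
  induction ks with
  | nil => intro o' s _ _; simp
  | cons c ks' ih =>
    intro o' s hnd hfr
    have hcs : c ∉ s := hfr c (by simp)
    have hcont : PySem.Set.contains s c = false := by
      simp [PySem.Set.contains, hcs]
    simp only [List.foldl_cons, hcont, Bool.false_eq_true, if_false]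
    have hadd : PySem.Set.add s c = s ++ [c] := by
      simp [PySem.Set.add, PySem.Set.contains, hcs]
    rw [hadd, ih (o' ++ [(c, some v)]) (s ++ [c]) (List.nodup_cons.mp hnd).2 ?_]
    · simp
    · intro c' hc' hmem
      rcases List.mem_append.mp hmem with h | h
      · exact hfr c' (by simp [hc']) h
      · have : c' = c := by simpa using h
        exact (List.nodup_cons.mp hnd).1 (this ▸ hc')

theorem pv_bfs_fresh {pairs : List (Int × Int)} (H : pvHyp pairs) {o : List (Int × Option Int)}
    {i : Nat} (hinv : pvInv pairs o i) (hi : i < o.length) :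
    ∀ c ∈ pvKids pairs o[i].1, c ∉ o.map Prod.fst := by
  intro c hc hmem
  have hvR : o[i].1 ∈ pvReach pairs := hinv.2.2.1 o[i] (o.getElem_mem hi)
  rcases List.mem_iff_getElem.mp hmem with ⟨j, hj, hju⟩
  rw [List.length_map] at hj
  rw [List.getElem_map] at hju
  rcases Nat.eq_zero_or_pos j with rfl | hpos
  · have h0 : o[0] = (1, none) := by
      have := hinv.1
      rwa [List.head?_eq_getElem?, List.getElem?_eq_getElem hj, Option.some_inj] at this
    rw [h0] at hju
    have hc1 : c = 1 := by simpa using hju.symm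
    exact H.2.2 (hc1 ▸ pv_mem_kids_occs hvR hc)
  · rcases hinv.2.2.2.1 j hj hpos with ⟨p, _, hkid, k, hk, _, hki, hkp⟩
    have hpR : p ∈ pvReach pairs := hkp ▸ hinv.2.2.1 o[k] (o.getElem_mem hk)
    have hpv : p = o[i].1 := pv_uniq_parent H hpR hvR (hju ▸ hkid) hc
    have : (o.map Prod.fst)[k]'(by simpa using hk) = (o.map Prod.fst)[i]'(by simpa using hi) := by
      rw [List.getElem_map, List.getElem_map, hkp, hpv]
    have hk_eq_i : k = i := (List.Nodup.getElem_inj_iff hinv.2.1).mp this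
    omega

theorem pv_bfs_step {pairs : List (Int × Int)} (H : pvHyp pairs) {o : List (Int × Option Int)}
    {i : Nat} (hinv : pvInv pairs o i) (hi : i < o.length) :
    pvInv pairs (o ++ (pvKids pairs o[i].1).map (fun c => (c, some o[i].1))) (i + 1) := by
  have hvR : o[i].1 ∈ pvReach pairs := hinv.2.2.1 o[i] (o.getElem_mem hi)
  have hfresh := pv_bfs_fresh H hinv hi
  have hknd := pv_kids_nodup H hvR
  have honil : o ≠ [] := by
    intro h; rw [h] at hi; simp at hi
  refine ⟨?_, ?_, ?_, ?_, ?_⟩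
  · rw [List.head?_append_of_ne_nil _ honil]
    exact hinv.1
  · have hmap : (o ++ (pvKids pairs o[i].1).map (fun c => (c, some o[i].1))).map Prod.fst
        = o.map Prod.fst ++ pvKids pairs o[i].1 := by
      rw [List.map_append, List.map_map]
      simp [Function.comp_def]
    rw [hmap, List.nodup_append]
    exact ⟨hinv.2.1, hknd, fun a ha b hb hab => (hab ▸ hfresh b hb) ha⟩
  · intro e he
    rcases List.mem_append.mp he with h | h
    · exact hinv.2.2.1 e h
    · rcases List.mem_map.mp h with ⟨c, hc, rfl⟩
      exact pv_mem_kids_reach H hvR hc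
  · intro j hj hpos
    rw [List.length_append, List.length_map] at hj
    by_cases hjo : j < o.length
    · rcases hinv.2.2.2.1 j hjo hpos with ⟨p, h2, hkid, k, hk, hkj, hki, hkp⟩
      refine ⟨p, ?_, ?_, k, by simpa using Nat.lt_of_lt_of_le hk (by simp), hkj, by omega, ?_⟩
      · rwa [List.getElem_append_left hjo]
      · rwa [List.getElem_append_left hjo]
      · rwa [List.getElem_append_left (by omega : k < o.length)]
    · have hjo' : o.length ≤ j := by omega
      refine ⟨o[i].1, ?_, ?_, i, by simpa using Nat.lt_of_lt_of_le hi (by simp), by omega, by omega, ?_⟩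
      · rw [List.getElem_append_right hjo', List.getElem_map]
      · rw [List.getElem_append_right hjo', List.getElem_map]
        exact List.getElem_mem _
      · rw [List.getElem_append_left hi]
  · intro k hk hki c hc
    rw [List.length_append, List.length_map] at hk
    by_cases hko : k < o.length
    · by_cases hkilt : k < i
      · rw [List.getElem_append_left hko] at hc
        rcases hinv.2.2.2.2 k hko hkilt c hc with ⟨j, hj, hkj, hjc⟩
        exact ⟨j, by simp [List.length_append]; omega, hkj, by
          rwa [List.getElem_append_left hj]⟩
      · have hkeq : k = i := by omega
        subst hkeq
        rw [List.getElem_append_left hko] at hc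
        rcases List.mem_iff_getElem.mp hc with ⟨m, hm, hmc⟩
        refine ⟨o.length + m, by simp [List.length_append]; omega, by omega, ?_⟩
        rw [List.getElem_append_right (by omega)]
        simp only [List.getElem_map]
        simpa using hmc
    · exfalso
      omega

theorem pv_inv_sat {pairs : List (Int × Int)} {o : List (Int × Option Int)} {i : Nat}
    (hinv : pvInv pairs o i) (hge : o.length ≤ i) : pvInv pairs o o.length := by
  refine ⟨hinv.1, hinv.2.1, hinv.2.2.1, ?_, ?_⟩
  · intro j hj hpos
    rcases hinv.2.2.2.1 j hj hpos with ⟨p, h2, hkid, k, hk, hkj, _, hkp⟩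
    exact ⟨p, h2, hkid, k, hk, hkj, hk, hkp⟩
  · intro k hk _ c hc
    exact hinv.2.2.2.2 k hk (by omega) c hc

theorem pv_bfs_run {pairs : List (Int × Int)} (H : pvHyp pairs) :
    ∀ (fuel : Nat) (o : List (Int × Option Int)) (i : Nat),
      pvInv pairs o i → (pvOccs pairs).length + 1 ≤ fuel + i →
      pvInv pairs (pvBfs (pvAdj pairs) fuel o (o.map Prod.fst) i)
        (pvBfs (pvAdj pairs) fuel o (o.map Prod.fst) i).length := by
  intro fuel
  induction fuel with
  | zero =>
    intro o i hinv hfuel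
    have hlen := pv_inv_len H hinv
    have h0 : pvBfs (pvAdj pairs) 0 o (o.map Prod.fst) i = o := rfl
    rw [h0]
    exact pv_inv_sat hinv (by omega)
  | succ fuel ih =>
    intro o i hinv hfuel
    by_cases hi : i < o.length
    · have hgetl : o[i]? = some o[i] := List.getElem?_eq_getElem hi
      have hfold := pv_bfs_fold o[i].1 (pvKids pairs o[i].1) o (o.map Prod.fst)
        (pv_kids_nodup H (hinv.2.2.1 o[i] (o.getElem_mem hi))) (pv_bfs_fresh H hinv hi)
      have hstep := pv_bfs_step H hinv hi
      have hmap : (o ++ (pvKids pairs o[i].1).map (fun c => (c, some o[i].1))).map Prod.fst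
          = o.map Prod.fst ++ pvKids pairs o[i].1 := by
        rw [List.map_append, List.map_map]
        simp [Function.comp_def]
      have hrun := ih (o ++ (pvKids pairs o[i].1).map (fun c => (c, some o[i].1))) (i+1)
        hstep (by omega)
      rw [hmap] at hrun
      have hunf : pvBfs (pvAdj pairs) (fuel+1) o (o.map Prod.fst) i
          = pvBfs (pvAdj pairs) fuel
              (o ++ (pvKids pairs o[i].1).map (fun c => (c, some o[i].1)))
              (o.map Prod.fst ++ pvKids pairs o[i].1) (i+1) := by
        rw [pvBfs, hgetl]
        simp only [pv_adj_getD, hfold]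
      rw [hunf]
      exact hrun
    · have hnone : o[i]? = none := List.getElem?_eq_none (by omega)
      have hunf : pvBfs (pvAdj pairs) (fuel+1) o (o.map Prod.fst) i = o := by
        rw [pvBfs, hnone]
      rw [hunf]
      have := pv_inv_len H hinv
      exact pv_inv_sat hinv (by omega)

-- ---------- bridges from the BFS invariant to list splits ----------
theorem pv_split_parent {pairs : List (Int × Int)} {o o1 o2' : List (Int × Option Int)}
    {e : Int × Option Int} (hinv : pvInv pairs o o.length) (hsplit : o = o1 ++ e :: o2') :
    (e.2 = none → o1 = []) ∧
    ∀ p, e.2 = some p → p ∈ o1.map Prod.fst ∧ e.1 ∈ pvKids pairs p := by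
  subst hsplit
  have hj : o1.length < (o1 ++ e :: o2').length := by
    rw [List.length_append, List.length_cons]; omega
  have hoj : (o1 ++ e :: o2')[o1.length]'hj = e := by
    rw [List.getElem_append_right (le_refl o1.length)]
    simp
  constructor
  · intro hnone
    by_contra hne
    have hpos : 0 < o1.length := List.length_pos_iff.mpr hne
    rcases hinv.2.2.2.1 o1.length hj hpos with ⟨p, hsome, _, _⟩
    rw [hoj, hnone] at hsome
    simp at hsome
  · intro p hp
    rcases Nat.eq_zero_or_pos o1.length with h0 | hpos
    · exfalso
      have ho1 : o1 = [] := List.eq_nil_of_length_eq_zero h0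
      have : (o1 ++ e :: o2').head? = some e := by rw [ho1]; rfl
      rw [hinv.1] at this
      have he : e = (1, none) := by simpa using this.symm
      rw [he] at hp
      simp at hp
    · rcases hinv.2.2.2.1 o1.length hj hpos with ⟨p', hsome, hkid, k, hk, hkj, _, hkp⟩
      rw [hoj] at hsome hkid
      have hpp : p' = p := by rw [hp] at hsome; exact (Option.some_inj.mp hsome).symm
      subst hpp
      refine ⟨?_, hkid⟩
      have hko : k < o1.length := hkj
      have : (o1 ++ e :: o2')[k]'hk = o1[k]'hko := List.getElem_append_left hko
      rw [this] at hkp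
      exact hkp ▸ List.mem_map.mpr ⟨o1[k], List.getElem_mem hko, rfl⟩

theorem pv_split_kids {pairs : List (Int × Int)} {o o1 o2' : List (Int × Option Int)}
    {e : Int × Option Int} (hinv : pvInv pairs o o.length) (hsplit : o = o1 ++ e :: o2') :
    ∀ c ∈ pvKids pairs e.1, c ∈ o2'.map Prod.fst := by
  subst hsplit
  have hj : o1.length < (o1 ++ e :: o2').length := by
    rw [List.length_append, List.length_cons]; omega
  have hoj : (o1 ++ e :: o2')[o1.length]'hj = e := by
    rw [List.getElem_append_right (le_refl o1.length)]
    simp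
  intro c hc
  rcases hinv.2.2.2.2 o1.length hj hj c (by rw [hoj]; exact hc) with ⟨j, hjo, hkj, hjc⟩
  obtain ⟨m, rfl⟩ : ∃ m, j = o1.length + (m + 1) := ⟨j - o1.length - 1, by omega⟩
  have hm : m < o2'.length := by
    rw [List.length_append, List.length_cons] at hjo; omega
  have : (o1 ++ e :: o2')[o1.length + (m+1)]'hjo = o2'[m]'hm := by
    rw [List.getElem_append_right (by omega : o1.length ≤ o1.length + (m+1))]
    have : o1.length + (m + 1) - o1.length = m + 1 := by omega
    simp [this]
  rw [this] at hjc
  exact hjc ▸ List.mem_map.mpr ⟨o2'[m], List.getElem_mem hm, rfl⟩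

theorem pv_order_mem_reach {pairs : List (Int × Int)} (H : pvHyp pairs)
    {o : List (Int × Option Int)} (hinv : pvInv pairs o o.length) :
    ∀ u, u ∈ o.map Prod.fst ↔ u ∈ pvReach pairs := by
  intro u
  constructor
  · intro hu
    rcases List.mem_map.mp hu with ⟨e, he, rfl⟩
    exact hinv.2.2.1 e he
  · refine pv_reach_pred pairs (fun u => u ∈ o.map Prod.fst) ?_ ?_ u
    · have honil : o ≠ [] := by
        intro h; rw [h] at hinv; simpa using hinv.1
      have h0 : o[0]'(List.length_pos_iff.mpr honil) = (1, none) := by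
        have := hinv.1
        rwa [List.head?_eq_getElem?, List.getElem?_eq_getElem (List.length_pos_iff.mpr honil),
          Option.some_inj] at this
      exact List.mem_map.mpr ⟨(1, none), h0 ▸ List.getElem_mem _, rfl⟩
    · rintro cp hcp hmem
      rcases List.mem_iff_getElem.mp hmem with ⟨k, hk, hku⟩
      rw [List.length_map] at hk
      rw [List.getElem_map] at hku
      rcases hinv.2.2.2.2 k hk hk cp.1 (by rw [hku]; exact pv_mem_kids.mpr hcp) with ⟨j, hj, _, hjc⟩
      exact List.mem_map.mpr ⟨o[j], List.getElem_mem hj, hjc⟩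

-- ---------- the reverse size-accumulation pass ----------
theorem pv_size0_getD : ∀ (l : List (Int × Option Int)) (m : PySem.Dict Int Int) (u : Int),
    (l.foldl (fun (m : PySem.Dict Int Int) vp => m.insert vp.1 1) m).getD u 0
      = if u ∈ l.map Prod.fst then 1 else m.getD u 0 := by
  intro l
  induction l with
  | nil => intro m u; simp
  | cons e l' ih =>
    intro m u
    simp only [List.foldl_cons, ih, List.map_cons, List.mem_cons]
    by_cases hu : u ∈ l'.map Prod.fst
    · simp [hu]
    · by_cases hue : u = e.1
      · simp [hu, hue, PySem.Dict.getD_insert]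
      · simp [hu, hue, PySem.Dict.getD_insert_of_ne m 1 0 hue]

theorem pv_filter_cons_sum (g : Int → Int) :
    ∀ (l : List Int), l.Nodup → ∀ (v : Int), v ∈ l → ∀ (S : List Int), v ∉ S →
      ((l.filter (fun c => decide (c ∈ v :: S))).map g).sum
        = g v + ((l.filter (fun c => decide (c ∈ S))).map g).sum := by
  intro l
  induction l with
  | nil => intro _ v hv; simp at hv
  | cons a l' ih =>
    intro hnd v hv S hvS
    rcases List.mem_cons.mp hv with rfl | hv'
    · have hfl : l'.filter (fun c => decide (c ∈ v :: S)) = l'.filter (fun c => decide (c ∈ S)) := by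
        refine List.filter_congr ?_
        intro c hc
        have hcv : c ≠ v := fun h => (List.nodup_cons.mp hnd).1 (h ▸ hc)
        simp [hcv]
      simp only [List.filter_cons]
      rw [if_pos (by simp), if_neg (by simpa using hvS), hfl]
      simp
    · have hav : a ≠ v := fun h => (List.nodup_cons.mp hnd).1 (h ▸ hv')
      have hrec := ih (List.nodup_cons.mp hnd).2 v hv' S hvS
      simp only [List.filter_cons]
      by_cases haS : a ∈ S
      · rw [if_pos (by simp [haS]), if_pos (by simpa using haS)]
        simp only [List.map_cons, List.sum_cons, hrec]
        ring
      · rw [if_neg (by simp [hav, haS]), if_neg (by simpa using haS)]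
        exact hrec

theorem pv_size_fold {pairs : List (Int × Int)} (H : pvHyp pairs) {o : List (Int × Option Int)}
    (hinv : pvInv pairs o o.length) :
    ∀ (o2 o1 : List (Int × Option Int)), o = o1 ++ o2 →
      ∀ u ∈ o.map Prod.fst,
        (o2.reverse.foldl (fun (m : PySem.Dict Int Int) vp =>
            match vp.2 with
            | some p => m.insert p (m.getD p 0 + m.getD vp.1 0)
            | none => m)
          (o.foldl (fun (m : PySem.Dict Int Int) vp => m.insert vp.1 1) PySem.Dict.empty)).getD u 0
        = if u ∈ o2.map Prod.fst then pvSZ pairs u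
          else 1 + (((pvKids pairs u).filter
              (fun c => decide (c ∈ o2.map Prod.fst))).map (pvSZ pairs)).sum := by
  intro o2
  induction o2 with
  | nil =>
    intro o1 hsplit u hu
    simp only [List.reverse_nil, List.foldl_nil, List.map_nil]
    rw [pv_size0_getD, if_pos hu]
    simp
  | cons e o2' ih =>
    intro o1 hsplit u hu
    obtain ⟨v, pe⟩ := e
    have hih := ih (o1 ++ [(v, pe)]) (by rw [hsplit, List.append_assoc]; rfl)
    have hfsts : o.map Prod.fst = o1.map Prod.fst ++ v :: o2'.map Prod.fst := by
      rw [hsplit]; simp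
    have hndf : (o1.map Prod.fst ++ v :: o2'.map Prod.fst).Nodup := hfsts ▸ hinv.2.1
    have hvno1 : v ∉ o1.map Prod.fst := by
      rcases List.nodup_append.mp hndf with ⟨_, _, hdisj⟩
      intro hmem
      exact hdisj v hmem v (by simp) rfl
    have hvnS : v ∉ o2'.map Prod.fst := by
      rcases List.nodup_append.mp hndf with ⟨_, hnd2, _⟩
      exact (List.nodup_cons.mp hnd2).1
    have hvR : v ∈ pvReach pairs := by
      have : (v, pe) ∈ o := by rw [hsplit]; simp
      exact hinv.2.2.1 (v, pe) this
    have hkids_sub : ∀ c ∈ pvKids pairs v, c ∈ o2'.map Prod.fst :=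
      pv_split_kids hinv hsplit
    have hMv : ((o2'.reverse.foldl (fun (m : PySem.Dict Int Int) vp =>
            match vp.2 with
            | some p => m.insert p (m.getD p 0 + m.getD vp.1 0)
            | none => m)
          (o.foldl (fun (m : PySem.Dict Int Int) vp => m.insert vp.1 1) PySem.Dict.empty))).getD v 0
        = pvSZ pairs v := by
      rw [hih v (by rw [hfsts]; simp)]
      rw [if_neg hvnS]
      have hfe : (pvKids pairs v).filter (fun c => decide (c ∈ o2'.map Prod.fst))
          = pvKids pairs v := by
        rw [List.filter_eq_self]
        intro c hc
        simpa using hkids_sub c hc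
      rw [hfe, ← pv_szfix H hvR]
    have hstep : (((v, pe) :: o2').reverse.foldl (fun (m : PySem.Dict Int Int) vp =>
            match vp.2 with
            | some p => m.insert p (m.getD p 0 + m.getD vp.1 0)
            | none => m)
          (o.foldl (fun (m : PySem.Dict Int Int) vp => m.insert vp.1 1) PySem.Dict.empty))
        = (fun (m : PySem.Dict Int Int) (vp : Int × Option Int) =>
            match vp.2 with
            | some p => m.insert p (m.getD p 0 + m.getD vp.1 0)
            | none => m)
          (o2'.reverse.foldl (fun (m : PySem.Dict Int Int) vp =>
            match vp.2 with
            | some p => m.insert p (m.getD p 0 + m.getD vp.1 0)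
            | none => m)
          (o.foldl (fun (m : PySem.Dict Int Int) vp => m.insert vp.1 1) PySem.Dict.empty)) (v, pe) := by
      rw [List.reverse_cons, List.foldl_append, List.foldl_cons, List.foldl_nil]
    rw [hstep]
    have hmemcons : u ∈ ((v, pe) :: o2').map Prod.fst ↔ u = v ∨ u ∈ o2'.map Prod.fst := by simp
    cases pe with
    | none =>
      have ho1 : o1 = [] := (pv_split_parent hinv hsplit).1 rfl
      simp only
      by_cases huv : u = v
      · subst huv
        rw [hMv, if_pos (by simp)]
      · have huS : u ∈ o2'.map Prod.fst := by
          rw [hfsts, ho1] at hu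
          simpa [huv] using hu
        rw [hih u hu, if_pos huS,
          if_pos (show u ∈ ((v, (none : Option Int)) :: o2').map Prod.fst by simp [huS])]
    | some p =>
      have hpar := (pv_split_parent hinv hsplit).2 p rfl
      have hpo1 : p ∈ o1.map Prod.fst := hpar.1
      have hvkid : v ∈ pvKids pairs p := hpar.2
      have hpR : p ∈ pvReach pairs := by
        rcases List.mem_map.mp (by rw [hfsts]; exact List.mem_append_left _ hpo1 :
          p ∈ o.map Prod.fst) with ⟨ep, hep, rfl⟩
        exact hinv.2.2.1 ep hep
      have hpv : p ≠ v := fun h => hvno1 (h ▸ hpo1)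
      have hpnS : p ∉ o2'.map Prod.fst := by
        rcases List.nodup_append.mp hndf with ⟨_, _, hdisj⟩
        intro hmem
        exact hdisj p hpo1 p (by simp [hmem]) rfl
      simp only
      by_cases huv : u = v
      · subst huv
        rw [PySem.Dict.getD_insert_of_ne _ _ 0 (fun h => hpv h.symm), hMv, if_pos (by simp)]
      · by_cases hup : u = p
        · subst hup
          rw [PySem.Dict.getD_insert, if_pos rfl, hMv]
          rw [hih u (by rw [hfsts]; exact List.mem_append_left _ hpo1), if_neg hpnS]
          rw [if_neg (by simp [huv, hpnS])]
          have hknd := pv_kids_nodup H hpR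
          have hfc := pv_filter_cons_sum (pvSZ pairs) (pvKids pairs u) hknd v hvkid
            (o2'.map Prod.fst) hvnS
          have hlist : ((v, some u) :: o2').map Prod.fst = v :: o2'.map Prod.fst := by simp
          rw [hlist, hfc]
          ring
        · rw [PySem.Dict.getD_insert_of_ne _ _ 0 hup, hih u hu]
          by_cases huS : u ∈ o2'.map Prod.fst
          · rw [if_pos huS, if_pos (by simp [huS])]
          · rw [if_neg huS, if_neg (by simp [huv, huS])]
            have huR : u ∈ pvReach pairs := by
              rcases List.mem_map.mp hu with ⟨eu, heu, rfl⟩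
              exact hinv.2.2.1 eu heu
            have hvnku : v ∉ pvKids pairs u := by
              intro hmem
              exact hup (pv_uniq_parent H huR hpR hmem hvkid)
            have hfe : (pvKids pairs u).filter (fun c => decide (c ∈ ((v, some p) :: o2').map Prod.fst))
                = (pvKids pairs u).filter (fun c => decide (c ∈ o2'.map Prod.fst)) := by
              refine List.filter_congr ?_
              intro c hc
              have hcv : c ≠ v := fun h => hvnku (h ▸ hc)
              simp [hcv]
            rw [hfe]

theorem pv_main (t_nodes t_edges : Int) (t_from t_to : List Int)
    (hpre : Pre_even_forest t_nodes t_edges t_from t_to) :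
    even_forest t_nodes t_edges t_from t_to = even_forest_alt t_nodes t_edges t_from t_to := by
  obtain ⟨hlen, hcl, hnd, h1⟩ := hpre
  have H : pvHyp (t_from.zip t_to) := ⟨hcl, hnd, h1⟩
  have hplen : (t_from.zip t_to).length = t_from.length := by
    rw [List.length_zip]; omega
  have hF : pvF (t_from.zip t_to) = t_from.length + 1 := by
    rw [pvF, hplen]
  have hoccF : (pvOccs (t_from.zip t_to)).length + 1 ≤ t_from.length + 1 := by
    have := pv_occs_len_le (t_from.zip t_to)
    omega
  have h1R : (1 : Int) ∈ pvReach (t_from.zip t_to) := pv_one_mem_reach _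
  -- A's side: the recursion counts even subtrees
  have hcb : pvCB (t_from.zip t_to) 1 (t_from.length + 1) :=
    pv_cb_mono (by omega) (pv_cb_all H h1R)
  have hA : even_forest t_nodes t_edges t_from t_to
      = pvEvc (t_from.zip t_to) (t_from.length + 1) 1 := by
    unfold even_forest
    exact (pv_goA_spec H (t_from.length + 1) 1 PySem.Dict.empty h1R hcb
      (fun u _ => by simp)).1
  have hAc : pvEvc (t_from.zip t_to) (t_from.length + 1) 1
      = (((pvDesc (t_from.zip t_to) (t_from.length + 1) 1).tail.countP
          (fun u => decide (pvSZ (t_from.zip t_to) u % 2 = 0)) : Nat) : Int) := by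
    have := pv_evc_countP H (t_from.length + 1) 1 (by rw [hF]) h1R hcb
    simpa using this
  -- B's side: BFS order then reverse accumulation
  have hinv0 : pvInv (t_from.zip t_to) [((1 : Int), (none : Option Int))] 0 := by
    refine ⟨rfl, by simp, ?_, ?_, ?_⟩
    · intro e he
      have : e = (1, none) := by simpa using he
      rw [this]; exact h1R
    · intro j hj hpos
      simp at hj; omega
    · intro k hk hk0
      omega
  have hseen : ([((1 : Int), (none : Option Int))].map Prod.fst) = PySem.Set.ofList [(1:Int)] := by
    decide
  have hrun := pv_bfs_run H (t_from.length + 1) [((1 : Int), (none : Option Int))] 0 hinv0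
    (by omega)
  rw [hseen] at hrun
  set o := pvBfs (pvAdj (t_from.zip t_to)) (t_from.length + 1)
    [((1 : Int), (none : Option Int))] (PySem.Set.ofList [(1:Int)]) 0 with ho
  -- the accumulated sizes are the true subtree sizes
  have hsz := pv_size_fold H hrun o [] rfl
  -- o = (1, none) :: rest
  have honil : o ≠ [] := by
    intro h; rw [h] at hrun; simpa using hrun.1
  obtain ⟨e0, rest, hcons⟩ := List.exists_cons_of_ne_nil honil
  have he0 : e0 = (1, none) := by
    have := hrun.1
    rw [hcons] at this
    simpa using this
  -- every non-head entry has a parent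
  have hsome : ∀ e ∈ rest, e.2.isSome := by
    intro e he
    rcases List.mem_iff_getElem.mp he with ⟨m, hm, hme⟩
    have hm1 : m + 1 < o.length := by rw [hcons]; simpa using Nat.succ_lt_succ hm
    rcases hrun.2.2.2.1 (m+1) hm1 (by omega) with ⟨p, hp, _⟩
    have hoe : o[m+1]'hm1 = e := by
      simp only [hcons, List.getElem_cons_succ]
      exact hme
    rw [hoe] at hp
    rw [hp]; rfl
  -- final chaining
  have hBval : even_forest_alt t_nodes t_edges t_from t_to
      = ((o.filter (fun vp => vp.2.isSome &&
          (PySem.Int.mod ((o.reverse.foldl (fun (m : PySem.Dict Int Int) vp =>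
            match vp.2 with
            | some p => m.insert p (m.getD p 0 + m.getD vp.1 0)
            | none => m)
          (o.foldl (fun (m : PySem.Dict Int Int) vp => m.insert vp.1 1) PySem.Dict.empty)).getD vp.1 0) 2 == 0))).length : Int) := by
    rfl
  -- the two node lists are permutations of one another
  have hdesc1 : pvDesc (t_from.zip t_to) (t_from.length + 1) 1
      = 1 :: (pvDesc (t_from.zip t_to) (t_from.length + 1) 1).tail :=
    pv_desc_head _ _ _
  have hnd_dt : (pvDesc (t_from.zip t_to) (t_from.length + 1) 1).tail.Nodup := by
    have := pv_desc_nodup H (t_from.length + 1) 1 h1R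
    rw [hdesc1] at this
    exact (List.nodup_cons.mp this).2
  have h1nd : (1 : Int) ∉ (pvDesc (t_from.zip t_to) (t_from.length + 1) 1).tail := by
    have := pv_desc_nodup H (t_from.length + 1) 1 h1R
    rw [hdesc1] at this
    exact (List.nodup_cons.mp this).1
  have hofst : o.map Prod.fst = 1 :: rest.map Prod.fst := by
    rw [hcons, he0]
    simp
  have hnd_r : (rest.map Prod.fst).Nodup := by
    have := hrun.2.1
    rw [hofst] at this
    exact (List.nodup_cons.mp this).2
  have h1nr : (1 : Int) ∉ rest.map Prod.fst := by
    have := hrun.2.1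
    rw [hofst] at this
    exact (List.nodup_cons.mp this).1
  have hmemo := pv_order_mem_reach H hrun
  have hiff : ∀ u, u ∈ (pvDesc (t_from.zip t_to) (t_from.length + 1) 1).tail
      ↔ u ∈ rest.map Prod.fst := by
    intro u
    constructor
    · intro hu
      have huR : u ∈ pvReach (t_from.zip t_to) :=
        pv_desc_reach H h1R (by rw [hdesc1]; exact List.mem_cons_of_mem _ hu)
      have hu1 : u ≠ 1 := fun h => h1nd (h ▸ hu)
      have := (hmemo u).mpr huR
      rw [hofst] at this
      rcases List.mem_cons.mp this with h | h
      · exact absurd h hu1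
      · exact h
    · intro hu
      have huo : u ∈ o.map Prod.fst := by
        rw [hofst]; exact List.mem_cons_of_mem _ hu
      have huR := (hmemo u).mp huo
      have hu1 : u ≠ 1 := fun h => h1nr (h ▸ hu)
      have hud : u ∈ pvDesc (t_from.zip t_to) (t_from.length + 1) 1 :=
        pv_desc_root_mem H (by have := pv_occs_len_le (t_from.zip t_to); omega) huR
      rw [hdesc1] at hud
      rcases List.mem_cons.mp hud with h | h
      · exact absurd h hu1
      · exact h
  have hperm : (pvDesc (t_from.zip t_to) (t_from.length + 1) 1).tail.Perm (rest.map Prod.fst) :=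
    (List.perm_ext_iff_of_nodup hnd_dt hnd_r).mpr hiff
  rw [hA, hAc, hBval]
  set D := (o.reverse.foldl (fun (m : PySem.Dict Int Int) vp =>
      match vp.2 with
      | some p => m.insert p (m.getD p 0 + m.getD vp.1 0)
      | none => m)
    (o.foldl (fun (m : PySem.Dict Int Int) vp => m.insert vp.1 1) PySem.Dict.empty)) with hD
  have hnat : (pvDesc (t_from.zip t_to) (t_from.length + 1) 1).tail.countP
        (fun u => decide (pvSZ (t_from.zip t_to) u % 2 = 0))
      = (o.filter (fun vp => vp.2.isSome && (PySem.Int.mod (D.getD vp.1 0) 2 == 0))).length := by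
    rw [hperm.countP_eq, ← List.countP_eq_length_filter, hcons, he0, List.countP_cons]
    simp only [Option.isSome_none, Bool.false_and, Bool.false_eq_true, if_false, Nat.add_zero]
    rw [List.countP_map]
    refine List.countP_congr ?_
    intro e he
    have hse := hsome e he
    have hefst : e.1 ∈ o.map Prod.fst := by
      rw [hofst]
      exact List.mem_cons_of_mem _ (List.mem_map.mpr ⟨e, he, rfl⟩)
    have hsz_e := hsz e.1 hefst
    rw [if_pos hefst] at hsz_e
    have hmod : PySem.Int.mod (pvSZ (t_from.zip t_to) e.1) 2
        = pvSZ (t_from.zip t_to) e.1 % 2 :=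
      PySem.Int.mod_eq_emod_of_pos (by norm_num : (0:Int) < 2)
    simp [Function.comp_def, hse, hsz_e, hmod]
  exact_mod_cast congrArg (Nat.cast : Nat → Int) hnat

-- ===== VERDICT (by name: the statement is the Claim_ definition above) =====
theorem even_forest_spec : Claim_equal_even_forest := by
  unfold Claim_equal_even_forest
  intro t_nodes t_edges t_from t_to hdom hpre
  unfold Spec_even_forest
  exact pv_main t_nodes t_edges t_from t_to hpre
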